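-- pv_equiv track=rewrite | github.com/jcwilbur/AOC2023 | puzzle7/7a.py | isFiveOfAKind
-- ===== SOURCE A (Python) =====
-- def isFiveOfAKind(hand):
--     maxCount = 0
--     for card in hand:
--         count = 0
--         if hand.count(card) > maxCount:
--             maxCount = hand.count(card)
--     if maxCount == 5:
--         return True
--     return False
-- ===== SOURCE B (Python) =====
-- def isFiveOfAKind(hand):
--     counts = {}
--     for card in hand:
--         counts[card] = counts.get(card, 0) + 1
--     return bool(counts) and max(counts.values()) == 5
-- ===== Notes on version B (the rewrite author's own statement) =====
-- stated objective: faster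
-- what changed: Replaces the loop that rescans the whole hand with hand.count for every position by a single-pass frequency dictionary whose maximum value is then compared to 5.
import Mathlib
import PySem

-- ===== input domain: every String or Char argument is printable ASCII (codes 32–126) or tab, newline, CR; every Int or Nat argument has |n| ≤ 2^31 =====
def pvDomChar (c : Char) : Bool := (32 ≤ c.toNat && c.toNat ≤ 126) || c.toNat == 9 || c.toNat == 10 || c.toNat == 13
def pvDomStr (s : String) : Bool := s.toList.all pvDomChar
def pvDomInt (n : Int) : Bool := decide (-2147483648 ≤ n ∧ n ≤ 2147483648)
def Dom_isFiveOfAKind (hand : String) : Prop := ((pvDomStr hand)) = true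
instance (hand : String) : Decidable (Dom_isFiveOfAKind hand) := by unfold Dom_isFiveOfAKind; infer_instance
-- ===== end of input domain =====

-- B replaces A's quadratic rescan (hand.count for every position) by a one-pass
-- frequency dictionary whose maximum value is compared to 5 (objective: faster).

-- ===== PORT A =====
-- hand.count(card): card is a single character of hand, so the substring count
-- is exactly the character count (PySem.List.count over the characters; exact here).
def isFiveOfAKind (hand : String) : Bool :=
  let l := hand.toList
  let maxCount : Int := l.foldl
    (fun maxCount card =>
      if (l.count card : Int) > maxCount then (l.count card : Int) else maxCount) 0
  if maxCount == 5 then true else false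

-- ===== PORT B =====
def isFiveOfAKind_alt (hand : String) : Bool :=
  -- counts = {}; for card in hand: counts[card] = counts.get(card, 0) + 1
  let counts : PySem.Dict Char Int :=
    hand.toList.foldl (fun d card => d.insert card (d.getD card 0 + 1)) PySem.Dict.empty
  -- bool(counts) and max(counts.values()) == 5
  counts.size != 0 && (PySem.List.max? counts.values (fun v => v) == some (5 : Int))

-- ===== PRECONDITION & SPEC =====
def Spec_isFiveOfAKind (hand : String) (out : Bool) : Prop := out = isFiveOfAKind_alt hand
instance (hand : String) (out : Bool) : Decidable (Spec_isFiveOfAKind hand out) := by unfold Spec_isFiveOfAKind; infer_instance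

-- ===== CLAIM (what is proved, stated in full; the proofs are below) =====
def Claim_equal_isFiveOfAKind : Prop := ∀ (hand : String), Dom_isFiveOfAKind hand → Spec_isFiveOfAKind hand (isFiveOfAKind hand)

-- ===== LEMMAS AND PROOFS =====

-- A's running max with an 'if >' update is a foldl of max over the mapped counts.
theorem pv_foldl_if_eq_max (l : List Char) (f : Char → Int) (a : Int) :
    l.foldl (fun m c => if f c > m then f c else m) a
      = (l.map f).foldl max a := by
  have hfun : (fun m c => if f c > m then f c else m) = (fun m (c : Char) => max m (f c)) := by
    funext m c
    simp only [max_def]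
    split_ifs <;> omega
  rw [hfun, List.foldl_map]

-- the foldl-max over any list is attained (or the init), and bounds every element
theorem pv_foldl_max_ge (xs : List Int) (a : Int) : ∀ x ∈ xs, x ≤ xs.foldl max a :=
  (PySem.List.le_foldl_max xs a).2

theorem pv_foldl_max_init (xs : List Int) (a : Int) : a ≤ xs.foldl max a :=
  (PySem.List.le_foldl_max xs a).1

theorem isFiveOfAKind_eq (hand : String) :
    isFiveOfAKind hand = isFiveOfAKind_alt hand := by
  have hA : isFiveOfAKind hand
      = (if ((hand.toList.foldl (fun m c => if (hand.toList.count c : Int) > m then (hand.toList.count c : Int) else m) 0) == 5) = true then true else false) := rfl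
  have hB : isFiveOfAKind_alt hand
      = ((PySem.Dict.counter hand.toList).size != 0
          && (PySem.List.max? (PySem.Dict.counter hand.toList).values (fun v => v) == some (5 : Int))) := by
    have := PySem.Dict.foldl_insert_getD_add_one_eq_counter (xs := hand.toList) (κ := Char)
    simp only [isFiveOfAKind_alt, this]
  rw [hA, hB]
  set l := hand.toList with hl
  rw [pv_foldl_if_eq_max l (fun c => (l.count c : Int)) 0]
  cases hcl : l with
  | nil => simp [PySem.Dict.counter, PySem.Dict.size, PySem.Dict.empty]
  | cons c0 t0 =>
    -- values of the counter: counts of the distinct characters, in first-occurrence order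
    have hvals : (PySem.Dict.counter l).values
        = (PySem.Set.ofList l).map (fun k => (l.count k : Int)) := by
      have := PySem.Dict.items_counter (xs := l)
      simp only [PySem.Dict.values, this, List.map_map]
      rfl
    have hsz : (PySem.Dict.counter l).size = (PySem.Set.ofList l).length := by
      simp only [PySem.Dict.size, PySem.Dict.items_counter, List.length_map]
    -- the dedup list is nonempty
    have hdne : PySem.Set.ofList l ≠ [] := by
      intro h
      have : c0 ∈ PySem.Set.ofList l := by
        rw [← PySem.List.dedup_eq_ofList, PySem.List.mem_dedup, hcl]; exact List.mem_cons_self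
      rw [h] at this; exact absurd this (List.not_mem_nil)
    obtain ⟨d, ds, hds⟩ : ∃ d ds, PySem.Set.ofList l = d :: ds :=
      List.exists_cons_of_ne_nil hdne
    -- compute the max? on the nonempty mapped list
    have hmax : PySem.List.max? ((PySem.Set.ofList l).map (fun k => (l.count k : Int))) (fun v => v)
        = some ((ds.map (fun k => (l.count k : Int))).foldl max ((l.count d : Int))) := by
      rw [hds, List.map_cons, PySem.List.max?_id_cons]
    set f : Char → Int := fun k => (l.count k : Int) with hf
    set m : Int := (ds.map f).foldl max (f d) with hm
    -- every character of l appears in the dedup list and vice versa, so the two maxima agree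
    have hmem_iff : ∀ x : Int, (x ∈ l.map f ↔ x ∈ (PySem.Set.ofList l).map f) := by
      intro x
      simp only [List.mem_map, ← PySem.List.dedup_eq_ofList, PySem.List.mem_dedup]
    have h1 : (l.map f).foldl max 0 = m := by
      apply le_antisymm
      · -- foldl max 0 over l.map f: it is 0 or an element; elements are ≤ m; and 0 < m
        have hm_ge : ∀ x ∈ l.map f, x ≤ m := by
          intro x hx
          rw [hmem_iff, hds, List.map_cons] at hx
          rcases List.mem_cons.mp hx with h | h
          · rw [h, hm]; exact pv_foldl_max_init _ _
          · exact pv_foldl_max_ge _ _ x h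
        rcases PySem.List.foldl_max_mem (l.map f) 0 with h | h
        · rw [h, hm]
          have hd_pos : (1 : Int) ≤ f d := by
            have : d ∈ l := by
              rw [← PySem.List.mem_dedup, PySem.List.dedup_eq_ofList, hds]
              exact List.mem_cons_self
            have := List.count_pos_iff.mpr this
            simp only [hf]; omega
          calc (0 : Int) ≤ f d := by omega
            _ ≤ m := by rw [hm]; exact pv_foldl_max_init _ _
        · exact hm_ge _ h
      · -- m is 0-or-an-element of the dedup map, hence an element of l.map f, hence ≤ lhs
        have hle : ∀ x ∈ (PySem.Set.ofList l).map f, x ≤ (l.map f).foldl max 0 := by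
          intro x hx
          exact pv_foldl_max_ge _ _ x ((hmem_iff x).mpr hx)
        rcases PySem.List.foldl_max_mem (ds.map f) (f d) with h | h
        · rw [hm, h]
          apply hle
          rw [hds, List.map_cons]; exact List.mem_cons_self
        · apply hle
          rw [hds, List.map_cons]; exact List.mem_cons_of_mem _ h
    rw [← hcl, h1, hvals, hsz, hmax, hds]
    simp
    by_cases h : m = 5 <;> simp [h]

-- ===== VERDICT (by name: the statement is the Claim_ definition above) =====
theorem isFiveOfAKind_spec : Claim_equal_isFiveOfAKind := by
  intro hand _
  exact isFiveOfAKind_eq hand
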